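-- pv_equiv track=rewrite | github.com/Prudhvi-pln/udb | Clients/SuperembedClient.py | _decode_hunter
-- ===== SOURCE A (Python) =====
-- def _decode_hunter(h, u, n, t, e, r):
--     '''
--     python implementation of javascript's hunter function
--     '''
--     def _hunter_inner(d, e, f):
--         charset = "0123456789abcdefghijklmnopqrstuvwxyzABCDEFGHIJKLMNOPQRSTUVWXYZ+/"
--         source_base = charset[:e]
--         target_base = charset[:f]
--         result = 0
--
--         # Calculate the decimal value of the input string
--         for power, digit in enumerate(d[::-1]):
--             if digit in source_base:
--                 result += source_base.index(digit) * e**power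
--
--         converted_result = ""
--         while result > 0:
--             converted_result = target_base[result % f] + converted_result
--             result = (result - (result % f)) // f
--
--         return converted_result or "0"
--
--     result = ""
--     i = 0
--
--     while i < len(h):
--         s = ""
--         while h[i] != n[e]:
--             s += h[i]
--             i += 1
--         for j in range(len(n)):
--             s = s.replace(n[j], str(j))
--         result += chr(int(_hunter_inner(s, e, 10)) - t)
--         i += 1
--
--     return result
-- ===== SOURCE B (Python) =====
-- def _decode_hunter(h, u, n, t, e, r):
--     '''
--     python implementation of javascript's hunter function
--     (single char-by-char pass; per-segment value by one forward Horner pass,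
--     no base-10 re-encode / int() re-parse)
--     '''
--     charset = "0123456789abcdefghijklmnopqrstuvwxyzABCDEFGHIJKLMNOPQRSTUVWXYZ+/"
--     if not h:
--         return ""
--     source_base = charset[:e]
--     delim = n[e]
--     out = []
--     seg = []
--     for ch in h:
--         if ch != delim:
--             seg.append(ch)
--             continue
--         s = "".join(seg)
--         seg = []
--         for j in range(len(n)):
--             s = s.replace(n[j], str(j))
--         value = 0
--         for c in s:
--             value = value * e + (source_base.index(c) if c in source_base else 0)
--         out.append(chr(value - t))
--     return "".join(out)
-- ===== Notes on version B (the rewrite author's own statement) =====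
-- stated objective: simpler
-- what changed: B replaces A's index-driven nested while-loops with a single forward character pass, and replaces A's per-segment reversed power-sum + base-10 string re-encode + int() re-parse with one inline Horner evaluation emitting chr(value - t) directly.
-- outside the precondition, e.g. on _decode_hunter('xx#', '', '#x', 0, -2, 0): A returns '\x00', B raises ValueError
import Mathlib
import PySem

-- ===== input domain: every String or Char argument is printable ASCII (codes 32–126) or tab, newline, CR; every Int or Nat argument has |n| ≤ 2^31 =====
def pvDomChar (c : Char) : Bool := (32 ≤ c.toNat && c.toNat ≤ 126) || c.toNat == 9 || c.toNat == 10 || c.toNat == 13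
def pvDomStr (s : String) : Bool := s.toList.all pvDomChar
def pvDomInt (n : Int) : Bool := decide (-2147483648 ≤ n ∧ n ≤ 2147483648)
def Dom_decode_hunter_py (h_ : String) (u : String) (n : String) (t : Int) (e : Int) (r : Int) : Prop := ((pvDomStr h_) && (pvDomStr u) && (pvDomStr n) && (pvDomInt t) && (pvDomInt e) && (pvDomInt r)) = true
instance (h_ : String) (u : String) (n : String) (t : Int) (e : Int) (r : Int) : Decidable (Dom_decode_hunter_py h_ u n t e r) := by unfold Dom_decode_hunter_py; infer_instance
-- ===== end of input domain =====

-- B replaces A's index-driven nested while-loops with a single forward character pass and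
-- replaces the per-segment reversed power-sum + base-10 re-encode + int() re-parse with one
-- Horner evaluation (objective: simpler).

-- ===== shared helpers (identical code in both Pythons) =====
def pvCharset : List Char :=
  "0123456789abcdefghijklmnopqrstuvwxyzABCDEFGHIJKLMNOPQRSTUVWXYZ+/".toList

-- for j in range(len(n)): s = s.replace(n[j], str(j))   (identical loop in A and B)
def pvReplaceDigits (n : List Char) (s : List Char) : List Char :=
  (List.range n.length).foldl
    (fun s j => PySem.Chars.replace s [n.getD j ' '] (PySem.Int.toChars j)) s

-- chr(code): total stand-in; Python raises on an invalid code point, Pre_ excludes those inputs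
def pvChr (code : Int) : List Char := [Char.ofNat code.toNat]

-- ===== PORT A =====
-- while result > 0: converted_result = target_base[result % f] + converted_result; result = (result - (result % f)) // f
-- (fuel = result.toNat bounds the iteration count exactly: each step strictly decreases result)
def pvToBaseAux (target : List Char) (f : Int) : Nat → Int → List Char → List Char
  | 0, _, acc => acc
  | fuel+1, res, acc =>
    if 0 < res then
      pvToBaseAux target f fuel (PySem.Int.floordiv (res - PySem.Int.mod res f) f)
        ((PySem.List.pyGet? target (PySem.Int.mod res f)).getD '0' :: acc)
    else acc

-- def _hunter_inner(d, e, f)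
def pvHunterInner (d : List Char) (e : Int) (f : Int) : List Char :=
  let source_base := PySem.List.slice pvCharset none (some e)
  let target_base := PySem.List.slice pvCharset none (some f)
  let result : Int := (PySem.List.enumerate d.reverse).foldl
    (fun acc pd =>
      if pd.2 ∈ source_base then
        acc + ((PySem.List.index? source_base pd.2).getD 0 : Int) * e ^ pd.1.toNat
      else acc) 0
  let conv := pvToBaseAux target_base f result.toNat result []
  if conv = [] then ['0'] else conv

-- int(s): ported by hand as a decimal-digit fold; exact on the nonempty decimal-digit
-- strings _hunter_inner always returns (its output chars come from "0123456789")
def pvParseDec (s : List Char) : Int :=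
  s.foldl (fun a c => a * 10 + ((c.toNat : Int) - 48)) 0

-- inner while: s = ""; while h[i] != n[e]: s += h[i]; i += 1   (runs off the end → Python IndexError; Pre_ excludes)
def pvScanSeg (delim : Char) : List Char → List Char × List Char
  | [] => ([], [])
  | c :: cs =>
    if c = delim then ([], cs)
    else
      let p := pvScanSeg delim cs
      (c :: p.1, p.2)

theorem pvScanSeg_rest_lt (delim : Char) : ∀ (l : List Char), l ≠ [] →
    (pvScanSeg delim l).2.length < l.length := by
  intro l
  induction l with
  | nil => intro h; exact absurd rfl h
  | cons c cs ih =>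
    intro _
    simp only [pvScanSeg]
    split
    · simp
    · rcases cs with _ | ⟨d, ds⟩
      · simp [pvScanSeg]
      · have := ih (by simp)
        simpa using Nat.lt_succ_of_lt this

-- outer while of A
def pvOuterA (n : List Char) (t e : Int) (delim : Char) : List Char → List Char
  | [] => []
  | c :: cs =>
    let p := pvScanSeg delim (c :: cs)
    let s' := pvReplaceDigits n p.1
    pvChr (pvParseDec (pvHunterInner s' e 10) - t) ++ pvOuterA n t e delim p.2
  termination_by l => l.length
  decreasing_by
    exact pvScanSeg_rest_lt delim (c :: cs) (by simp)

def decode_hunter_py (h_ : String) (u : String) (n : String) (t : Int) (e : Int) (r : Int) : String :=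
  let delim := (PySem.Str.pyGet? n e).getD ' '   -- n[e]; evaluated only when h is nonempty in Python, Pre_ keeps it in range there
  String.ofList (pvOuterA n.toList t e delim h_.toList)

-- ===== PORT B =====
-- value = 0; for c in s: value = value*e + (source_base.index(c) if c in source_base else 0)
def pvHorner (source_base : List Char) (e : Int) (s : List Char) : Int :=
  s.foldl
    (fun v c =>
      v * e + (if c ∈ source_base then ((PySem.List.index? source_base c).getD 0 : Int) else 0)) 0

-- one step of B's single forward pass (state: out so far, current segment)
def pvStepB (n : List Char) (t e : Int) (source_base : List Char) (delim : Char)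
    (st : List Char × List Char) (ch : Char) : List Char × List Char :=
  if ch ≠ delim then (st.1, st.2 ++ [ch])
  else
    let s := pvReplaceDigits n st.2
    (st.1 ++ pvChr (pvHorner source_base e s - t), [])

def decode_hunter_py_alt (h_ : String) (u : String) (n : String) (t : Int) (e : Int) (r : Int) : String :=
  if h_.toList = [] then "" else
    let source_base := PySem.List.slice pvCharset none (some e)
    let delim := (PySem.Str.pyGet? n e).getD ' '
    let st := h_.toList.foldl (pvStepB n.toList t e source_base delim) ([], [])
    String.ofList st.1

-- ===== PRECONDITION & SPEC =====
-- the decimal value (after digit replacement) of one segment, minus t: the code point A passes to chr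
def pvCode (n : List Char) (e t : Int) (seg : List Char) : Int :=
  (pvReplaceDigits n seg).foldl
    (fun v c => v * e + ((PySem.List.index? (PySem.List.slice pvCharset none (some e)) c).getD 0 : Int)) 0 - t

-- Pre_ excludes: inputs where Python A raises (e outside n's index range: IndexError; h not
-- ending with the delimiter n[e]: IndexError; chr argument negative or ≥ 0x110000: ValueError),
-- segments whose decoded value is negative (possible only for negative e: A's base-10 loop
-- silently collapses them to chr(0 - t), an artefact, while B's chr raises ValueError), and
-- segments decoding to a lone surrogate (A returns it, but it is not a value of the Lean
-- String type).
def Pre_decode_hunter_py (h_ : String) (u : String) (n : String) (t : Int) (e : Int) (r : Int) : Prop :=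
  h_.toList = [] ∨
    (PySem.Raise.InRange n.toList.length e ∧
     h_.toList.getLast? = some ((PySem.List.pyGet? n.toList e).getD ' ') ∧
     ∀ seg ∈ (List.splitOn ((PySem.List.pyGet? n.toList e).getD ' ') h_.toList).dropLast,
       0 ≤ pvCode n.toList e t seg + t ∧
       0 ≤ pvCode n.toList e t seg ∧
       (pvCode n.toList e t seg < 55296 ∨ 57344 ≤ pvCode n.toList e t seg) ∧
       pvCode n.toList e t seg < 1114112)
instance (h_ : String) (u : String) (n : String) (t : Int) (e : Int) (r : Int) : Decidable (Pre_decode_hunter_py h_ u n t e r) := by unfold Pre_decode_hunter_py; infer_instance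

def pvWitness_decode_hunter_py : String × String × String × Int × Int × Int :=
  ("00#", "", "x0#", -62, 2, 0)

def Spec_decode_hunter_py (h_ : String) (u : String) (n : String) (t : Int) (e : Int) (r : Int) (out : String) : Prop := out = decode_hunter_py_alt h_ u n t e r
instance (h_ : String) (u : String) (n : String) (t : Int) (e : Int) (r : Int) (out : String) : Decidable (Spec_decode_hunter_py h_ u n t e r out) := by unfold Spec_decode_hunter_py; infer_instance

-- ===== CLAIM (what is proved, stated in full; the proofs are below) =====
def Claim_equal_decode_hunter_py : Prop := ∀ (h_ : String) (u : String) (n : String) (t : Int) (e : Int) (r : Int), Dom_decode_hunter_py h_ u n t e r → Pre_decode_hunter_py h_ u n t e r → Spec_decode_hunter_py h_ u n t e r (decode_hunter_py h_ u n t e r)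

-- ===== LEMMAS AND PROOFS =====

theorem pv_witness_ok :
    Dom_decode_hunter_py pvWitness_decode_hunter_py.1 pvWitness_decode_hunter_py.2.1
      pvWitness_decode_hunter_py.2.2.1 pvWitness_decode_hunter_py.2.2.2.1
      pvWitness_decode_hunter_py.2.2.2.2.1 pvWitness_decode_hunter_py.2.2.2.2.2 ∧
    Pre_decode_hunter_py pvWitness_decode_hunter_py.1 pvWitness_decode_hunter_py.2.1
      pvWitness_decode_hunter_py.2.2.1 pvWitness_decode_hunter_py.2.2.2.1
      pvWitness_decode_hunter_py.2.2.2.2.1 pvWitness_decode_hunter_py.2.2.2.2.2 := by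
  constructor <;> decide


-- decimal digit list of m (most significant first); empty for 0
def pvDecDigits (m : Nat) : List Char :=
  if h : m = 0 then [] else pvDecDigits (m / 10) ++ [Char.ofNat (48 + m % 10)]
  decreasing_by exact Nat.div_lt_self (Nat.pos_of_ne_zero h) (by omega)

-- Horner step used by B (and, once, by the positional-sum characterisation of A's inner loop)
theorem pvHorner_from (sb : List Char) (e : Int) :
    ∀ (s : List Char) (a : Int),
      s.foldl (fun v c => v * e + (if c ∈ sb then ((PySem.List.index? sb c).getD 0 : Int) else 0)) a
        = a * e ^ s.length
          + s.foldl (fun v c => v * e + (if c ∈ sb then ((PySem.List.index? sb c).getD 0 : Int) else 0)) 0 := by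
  intro s
  induction s with
  | nil => intro a; simp
  | cons c s ih =>
    intro a
    simp only [List.foldl_cons, List.length_cons]
    rw [ih (a * e + _), ih (0 * e + _)]
    ring

-- A's reversed-enumerate positional sum equals B's forward Horner pass
theorem pvSum_eq_horner (sb : List Char) (e : Int) (s : List Char) :
    (PySem.List.enumerate s.reverse).foldl
      (fun acc pd =>
        if pd.2 ∈ sb then acc + ((PySem.List.index? sb pd.2).getD 0 : Int) * e ^ pd.1.toNat else acc) 0
      = pvHorner sb e s := by
  induction s with
  | nil => simp [pvHorner]
  | cons c s ih =>
    simp only [List.reverse_cons]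
    rw [PySem.List.enumerate_append, List.foldl_append]
    simp only [pvHorner, List.foldl_cons]
    rw [pvHorner_from sb e s (0 * e + _)]
    simp only [pvHorner] at ih
    rw [ih]
    simp only [PySem.List.enumerate_cons, PySem.List.enumerate_nil, List.foldl_cons, List.foldl_nil,
      List.length_reverse]
    split
    · rw [show ((0 : Int) + (s.length : Int)).toNat = s.length by omega]
      ring
    · have h0 : ((0 : Int) * e + 0) * e ^ s.length = 0 := by ring
      rw [h0, zero_add]

theorem pvToBase_eq :
    ∀ (fuel m : Nat) (acc : List Char), m ≤ fuel →
      pvToBaseAux (PySem.List.slice pvCharset none (some 10)) 10 fuel (m : Int) acc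
        = pvDecDigits m ++ acc := by
  intro fuel
  induction fuel with
  | zero =>
    intro m acc hm
    have : m = 0 := by omega
    subst this
    rw [pvDecDigits]
    simp [pvToBaseAux]
  | succ fuel ih =>
    intro m acc hm
    by_cases h0 : m = 0
    · subst h0
      rw [pvDecDigits]
      simp [pvToBaseAux]
    · have hmod : PySem.Int.mod (m : Int) 10 = ((m % 10 : Nat) : Int) := by
        exact_mod_cast PySem.Int.mod_natCast m 10
      have hdiv : PySem.Int.floordiv ((m : Int) - ((m % 10 : Nat) : Int)) 10
          = ((m / 10 : Nat) : Int) := by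
        have h10 : (0 : Int) < 10 := by omega
        rw [PySem.Int.floordiv_eq_ediv_of_pos h10]
        have hsub : (m : Int) - ((m % 10 : Nat) : Int) = (((m - m % 10 : Nat)) : Int) := by
          have := Nat.mod_le m 10
          push_cast
          omega
        rw [hsub]
        omega
      have hget : PySem.List.pyGet? (PySem.List.slice pvCharset none (some 10)) ((m % 10 : Nat) : Int)
          = some (Char.ofNat (48 + m % 10)) := by
        have hlt : m % 10 < 10 := Nat.mod_lt _ (by omega)
        interval_cases h : m % 10 <;> decide
      rw [pvToBaseAux]
      rw [if_pos (by exact_mod_cast Nat.pos_of_ne_zero h0)]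
      rw [hmod, hdiv, hget]
      rw [ih (m / 10) _ (by omega)]
      conv_rhs => rw [pvDecDigits]
      simp only [h0, dif_neg, not_false_iff]
      simp [List.append_assoc]

theorem pvParseDec_decDigits (m : Nat) :
    ∀ (a : Int),
      (pvDecDigits m).foldl (fun a c => a * 10 + ((c.toNat : Int) - 48)) a
        = a * 10 ^ (pvDecDigits m).length + m := by
  induction m using Nat.strong_induction_on with
  | _ m ih =>
    intro a
    by_cases h0 : m = 0
    · subst h0
      rw [pvDecDigits]
      simp
    · rw [pvDecDigits]
      rw [dif_neg h0]
      rw [List.foldl_append, List.length_append]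
      rw [ih (m / 10) (Nat.div_lt_self (Nat.pos_of_ne_zero h0) (by omega)) a]
      simp only [List.foldl_cons, List.foldl_nil, List.length_cons, List.length_nil]
      have hc : (Char.ofNat (48 + m % 10)).toNat = 48 + m % 10 := by
        have hlt : m % 10 < 10 := Nat.mod_lt _ (by omega)
        interval_cases h : m % 10 <;> decide
      rw [hc]
      generalize (pvDecDigits (m / 10)).length = k
      have h2 : ((m / 10 : Nat) : Int) * 10 + ((m % 10 : Nat) : Int) = (m : Int) := by omega
      rw [Nat.cast_add, ← h2]
      push_cast
      ring

theorem pvDecDigits_ne_nil (m : Nat) (hm : m ≠ 0) : pvDecDigits m ≠ [] := by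
  rw [pvDecDigits]; simp [hm]

-- the Pre_-level segment code is exactly B's Horner value minus t (the membership test in the
-- Horner step is redundant: index? gives none, so getD 0, off the source base)
theorem pvCode_eq (n : List Char) (e t : Int) (seg : List Char) :
    pvCode n e t seg
      = pvHorner (PySem.List.slice pvCharset none (some e)) e (pvReplaceDigits n seg) - t := by
  unfold pvCode pvHorner
  congr 2
  funext v c
  by_cases hc : c ∈ PySem.List.slice pvCharset none (some e)
  · rw [if_pos hc]
  · rw [if_neg hc, (PySem.List.index?_eq_none_iff _ _).2 hc]
    rfl

-- delimiter-terminated lists split as one segment plus the rest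
theorem pvSplitOn_seg (S R : List Char) (d : Char) (h : d ∉ S) :
    (S ++ d :: R).splitOn d = S :: R.splitOn d := by
  unfold List.splitOn
  rw [List.splitOnP_append_cons _ _ _ _ (by simp)]
  rw [List.splitOnP_eq_single (fun x => x == d) S
    (by intro a ha hpa; rw [beq_iff_eq] at hpa; exact h (hpa ▸ ha))]
  rfl

-- A's inner helper (power sum, base-10 re-encode) then int() equals B's Horner value
theorem pvInner_eq (e : Int) (s : List Char)
    (hnn : 0 ≤ pvHorner (PySem.List.slice pvCharset none (some e)) e s) :
    pvParseDec (pvHunterInner s e 10)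
      = pvHorner (PySem.List.slice pvCharset none (some e)) e s := by
  simp only [pvHunterInner]
  rw [pvSum_eq_horner]
  generalize hv : pvHorner (PySem.List.slice pvCharset none (some e)) e s = v at *
  have hvv : v = ((v.toNat : Nat) : Int) := (Int.toNat_of_nonneg hnn).symm
  rw [hvv]
  simp only [Int.toNat_natCast]
  rw [pvToBase_eq v.toNat v.toNat [] le_rfl, List.append_nil]
  by_cases hz : v.toNat = 0
  · rw [hz, pvDecDigits]
    simp [pvParseDec]
  · rw [if_neg (pvDecDigits_ne_nil _ hz)]
    have := pvParseDec_decDigits v.toNat 0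
    simp only [pvParseDec]
    rw [this]
    simp

-- a list ending with the delimiter splits off its first segment, and that is what A's inner scan returns
theorem pvScanSeg_decomp (delim : Char) :
    ∀ (L : List Char), L.getLast? = some delim →
      ∃ S R, L = S ++ delim :: R ∧ delim ∉ S ∧ (R = [] ∨ R.getLast? = some delim) ∧
        pvScanSeg delim L = (S, R) := by
  intro L
  induction L with
  | nil => intro h; simp at h
  | cons c cs ih =>
    intro hlast
    by_cases hc : c = delim
    · subst hc
      refine ⟨[], cs, rfl, by simp, ?_, by simp [pvScanSeg]⟩
      rcases cs with _ | ⟨d, ds⟩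
      · exact Or.inl rfl
      · exact Or.inr (by rw [← List.getLast?_cons_cons]; exact hlast)
    · have hcs : cs ≠ [] := by
        rintro rfl
        simp at hlast
        exact hc hlast
      have hlast' : cs.getLast? = some delim := by
        rcases cs with _ | ⟨d, ds⟩
        · exact absurd rfl hcs
        · rw [← List.getLast?_cons_cons]; exact hlast
      obtain ⟨S', R', hL, hnm, hR, hscan⟩ := ih hlast'
      refine ⟨c :: S', R', by simp [hL], ?_, hR, ?_⟩
      · simp only [List.mem_cons]
        rintro (rfl | hm)
        · exact hc rfl
        · exact hnm hm
      · simp [pvScanSeg, hc, hscan]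

-- B's fold consumes one whole segment
theorem pvFoldB_segment (n : List Char) (t e : Int) (sb : List Char) (delim : Char) :
    ∀ (S : List Char), delim ∉ S → ∀ (R out seg : List Char),
      List.foldl (pvStepB n t e sb delim) (out, seg) (S ++ delim :: R)
        = List.foldl (pvStepB n t e sb delim)
            (out ++ pvChr (pvHorner sb e (pvReplaceDigits n (seg ++ S)) - t), []) R := by
  intro S
  induction S with
  | nil =>
    intro _ R out seg
    simp [pvStepB]
  | cons c S ih =>
    intro hnm R out seg
    have hc : c ≠ delim := by
      intro h
      exact hnm (h ▸ List.mem_cons_self)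
    simp only [List.cons_append, List.foldl_cons]
    have hstep : pvStepB n t e sb delim (out, seg) c = (out, seg ++ [c]) := by
      simp [pvStepB, hc]
    rw [hstep]
    rw [ih (fun hm => hnm (List.mem_cons_of_mem _ hm)) R out (seg ++ [c])]
    simp

-- the two loops agree on every list that is empty or ends with the delimiter,
-- provided every segment's decoded value is nonnegative
theorem pvMain (n : List Char) (t e : Int) (delim : Char) :
    ∀ (k : Nat) (L : List Char), L.length ≤ k → (L = [] ∨ L.getLast? = some delim) →
      (∀ seg ∈ (List.splitOn delim L).dropLast,
        0 ≤ pvHorner (PySem.List.slice pvCharset none (some e)) e (pvReplaceDigits n seg)) →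
      ∀ (out : List Char),
        (List.foldl (pvStepB n t e (PySem.List.slice pvCharset none (some e)) delim) (out, []) L).1
          = out ++ pvOuterA n t e delim L := by
  intro k
  induction k with
  | zero =>
    intro L hlen _ _ out
    have : L = [] := by
      cases L
      · rfl
      · simp at hlen
    subst this
    simp [pvOuterA]
  | succ k ih =>
    intro L hlen hok hseg out
    rcases hok with rfl | hlast
    · simp [pvOuterA]
    · obtain ⟨S, R, hL, hnm, hR, hscan⟩ := pvScanSeg_decomp delim L hlast
      subst hL
      have hsplit : (S ++ delim :: R).splitOn delim = S :: R.splitOn delim :=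
        pvSplitOn_seg S R delim hnm
      have hRne : R.splitOn delim ≠ [] := by
        unfold List.splitOn
        exact List.splitOnP_ne_nil _ _
      have hheadnn :
          0 ≤ pvHorner (PySem.List.slice pvCharset none (some e)) e (pvReplaceDigits n S) := by
        apply hseg S
        rw [hsplit, List.dropLast_cons_of_ne_nil hRne]
        exact List.mem_cons_self
      have hsegR : ∀ seg ∈ (List.splitOn delim R).dropLast,
          0 ≤ pvHorner (PySem.List.slice pvCharset none (some e)) e (pvReplaceDigits n seg) := by
        intro seg hs
        apply hseg seg
        rw [hsplit, List.dropLast_cons_of_ne_nil hRne]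
        exact List.mem_cons_of_mem _ hs
      rw [pvFoldB_segment n t e _ delim S hnm R out []]
      have hRlen : R.length ≤ k := by
        simp only [List.length_append, List.length_cons] at hlen
        omega
      rw [ih R hRlen hR hsegR (out ++ _)]
      obtain ⟨c, cs, hcons⟩ : ∃ c cs, S ++ delim :: R = c :: cs := by
        rcases S with _ | ⟨a, S'⟩
        · exact ⟨delim, R, rfl⟩
        · exact ⟨a, S' ++ delim :: R, rfl⟩
      rw [hcons]
      conv_rhs => rw [pvOuterA]
      rw [← hcons, hscan]
      simp only [List.nil_append]
      rw [pvInner_eq e (pvReplaceDigits n S) hheadnn]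
      simp [List.append_assoc]

-- ===== VERDICT (by name: the statement is the Claim_ definition above) =====
theorem decode_hunter_py_spec : Claim_equal_decode_hunter_py := by
  unfold Claim_equal_decode_hunter_py
  intro h_ u n t e r hdom hpre
  unfold Spec_decode_hunter_py
  rcases hpre with hL | ⟨hinr, hlast, hval⟩
  · simp [decode_hunter_py, decode_hunter_py_alt, hL, pvOuterA]
  · have hLne : h_.toList ≠ [] := by
      intro h
      rw [h] at hlast
      simp at hlast
    have hdelim : (PySem.Str.pyGet? n e).getD ' ' = (PySem.List.pyGet? n.toList e).getD ' ' := by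
      simp
    have hseg : ∀ seg ∈ (List.splitOn ((PySem.Str.pyGet? n e).getD ' ') h_.toList).dropLast,
        0 ≤ pvHorner (PySem.List.slice pvCharset none (some e)) e (pvReplaceDigits n.toList seg) := by
      intro seg hs
      rw [hdelim] at hs
      have h1 := (hval seg hs).1
      have h2 := pvCode_eq n.toList e t seg
      omega
    simp only [decode_hunter_py, decode_hunter_py_alt, if_neg hLne]
    have hmain := pvMain n.toList t e ((PySem.Str.pyGet? n e).getD ' ')
      h_.toList.length h_.toList le_rfl (Or.inr (by rw [hdelim]; exact hlast)) hseg []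
    rw [hmain]
    simp
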